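-- pv_equiv track=rewrite | github.com/yofn/pyacm | bnu/team_201002/j.py | makeD
-- ===== SOURCE A (Python) =====
-- def log2i(n):
--     i = 0
--     while n>1:
--         n  = n>>1
--         i += 1
--     return i
--
-- def makeD(l):
--     l = sorted([l[0]-i for i in l[1:]],reverse=True)
--     n = len(l)
--     p = 0
--     d = []
--     for i in range(1,n+1):
--         if i==n or l[i]!=l[i-1]:
--             d.append([l[i-1],i-p])  #(val,#val)
--             p = i
--     return [[g[0],g[1],log2i(g[1])+1] for g in d]
-- ===== SOURCE B (Python) =====
-- def makeD(l):
--     counts = {}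
--     for i in l[1:]:
--         d = l[0] - i
--         counts[d] = counts.get(d, 0) + 1
--     return [[v, counts[v], counts[v].bit_length()] for v in sorted(counts, reverse=True)]
-- ===== Notes on version B (the rewrite author's own statement) =====
-- stated objective: simpler
-- what changed: A sorts the difference list descending and run-length-scans it with an index/boundary loop plus a hand-written halving loop for log2; B tallies the differences into a dict in one pass, sorts only the distinct keys descending, and reads each count's bit_length(), so the grouping scan and the log2 loop disappear.
import Mathlib
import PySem

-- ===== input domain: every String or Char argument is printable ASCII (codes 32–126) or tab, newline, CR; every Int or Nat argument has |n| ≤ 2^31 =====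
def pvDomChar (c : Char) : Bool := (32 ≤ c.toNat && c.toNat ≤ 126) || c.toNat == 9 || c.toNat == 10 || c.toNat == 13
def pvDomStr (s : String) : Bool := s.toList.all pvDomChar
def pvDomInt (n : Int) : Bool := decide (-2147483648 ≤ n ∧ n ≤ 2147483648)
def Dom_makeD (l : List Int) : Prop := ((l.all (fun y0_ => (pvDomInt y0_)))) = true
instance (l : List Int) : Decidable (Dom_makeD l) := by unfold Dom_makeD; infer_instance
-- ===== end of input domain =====

-- B replaces A's sort-then-run-length scan with a dict tally plus a sort of the
-- distinct keys, and A's halving loop with int.bit_length (objective: simpler).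

-- ===== PORT A =====
-- while n > 1: n >>= 1; i += 1 — ported as tail recursion over the same state (n, i)
def log2iGo (n i : Int) : Int :=
  if 1 < n then log2iGo (n >>> 1) (i + 1) else i
termination_by n.toNat
decreasing_by
  rename_i h
  have h2 : n >>> 1 = n / 2 := by
    rcases n with m | m
    · rfl
    · exact absurd h (by exact of_decide_eq_false rfl)
  omega

def log2i (n : Int) : Int := log2iGo n 0

-- the body of A's 'for i in range(1, n+1)' loop over the state (p, d)
def stepA (s : List Int) (n : Int) (st : Int × List (List Int)) (i : Int) :
    Int × List (List Int) :=
  if i = n ∨ PySem.List.pyGet? s i ≠ PySem.List.pyGet? s (i - 1) then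
    (i, st.2 ++ [[(PySem.List.pyGet? s (i - 1)).getD 0, i - st.1]])
  else st

def makeD (l : List Int) : List (List Int) :=
  let s := PySem.List.sorted
    ((PySem.List.slice l (some 1) none).map
      (fun i => (PySem.List.pyGet? l 0).getD 0 - i)) (fun x => x) true
  let n : Int := s.length
  let res := (PySem.List.pyRange 1 (n + 1) 1).foldl (stepA s n) (0, [])
  res.2.map (fun g =>
    [(PySem.List.pyGet? g 0).getD 0, (PySem.List.pyGet? g 1).getD 0,
     log2i ((PySem.List.pyGet? g 1).getD 0) + 1])

-- ===== PORT B =====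
def makeD_alt (l : List Int) : List (List Int) :=
  let counts := (PySem.List.slice l (some 1) none).foldl
    (fun d i => d.insert ((PySem.List.pyGet? l 0).getD 0 - i)
      (d.getD ((PySem.List.pyGet? l 0).getD 0 - i) 0 + 1)) PySem.Dict.empty
  (PySem.List.sorted counts.keys (fun x => x) true).map
    (fun v => [v, counts.getD v 0, (PySem.Int.bitLength (counts.getD v 0) : Int)])

-- ===== PRECONDITION & SPEC =====
def Spec_makeD (l : List Int) (out : List (List Int)) : Prop := out = makeD_alt l
instance (l : List Int) (out : List (List Int)) : Decidable (Spec_makeD l out) := by unfold Spec_makeD; infer_instance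

-- ===== CLAIM (what is proved, stated in full; the proofs are below) =====
def Claim_equal_makeD : Prop := ∀ (l : List Int), Dom_makeD l → Spec_makeD l (makeD l)

-- ===== LEMMAS AND PROOFS =====


theorem int_shiftr_one (n : Int) (h : 0 < n) : n >>> 1 = n / 2 := by
  rcases n with m | m
  · rfl
  · exact absurd h (by exact of_decide_eq_false rfl)

theorem log2iGo_shift (n i : Int) : log2iGo n i = log2iGo n 0 + i := by
  have H : ∀ m : Nat, ∀ n i : Int, n.toNat = m → log2iGo n i = log2iGo n 0 + i := by
    intro m
    induction m using Nat.strong_induction_on with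
    | _ m ih =>
      intro n i hm
      by_cases h : 1 < n
      · have h2 := int_shiftr_one n (by omega)
        have hlt : (n >>> 1).toNat < m := by omega
        rw [log2iGo, if_pos h]
        conv_rhs => rw [log2iGo, if_pos h]
        rw [ih _ hlt _ (i+1) rfl, ih _ hlt _ (0+1) rfl]
        omega
      · rw [log2iGo, if_neg h]
        conv_rhs => rw [log2iGo, if_neg h]
        omega
  exact H n.toNat n i rfl

theorem log2i_eq_bitLength (n : Int) (h : 1 ≤ n) :
    log2i n + 1 = (PySem.Int.bitLength n : Int) := by
  have H : ∀ m : Nat, ∀ n : Int, n.toNat = m → 1 ≤ n →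
      log2i n + 1 = (PySem.Int.bitLength n : Int) := by
    intro m
    induction m using Nat.strong_induction_on with
    | _ m ih =>
      intro n hm h1
      by_cases h : 1 < n
      · have h2 := int_shiftr_one n (by omega)
        have hfd : PySem.Int.floordiv n 2 = n / 2 :=
          PySem.Int.floordiv_eq_ediv_of_pos (by omega)
        have hbl := PySem.Int.bitLength_of_pos (n := n) (by omega)
        have hh : 1 ≤ n / 2 := by omega
        have hlt : (n / 2).toNat < m := by omega
        have := ih _ hlt (n / 2) rfl hh
        unfold log2i at *
        rw [log2iGo, if_pos h, log2iGo_shift, h2, hbl, hfd]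
        push_cast
        omega
      · have hn1 : n = 1 := by omega
        subst hn1
        unfold log2i
        rw [log2iGo, if_neg h]
        decide
  exact H n.toNat n rfl h

-- run-length encoding of a list (the value of A's grouping loop)
def rle : List Int → List (Int × Int)
  | [] => []
  | v :: r =>
    (v, 1 + ((r.takeWhile (· == v)).length : Int)) :: rle (r.dropWhile (· == v))
termination_by l => l.length
decreasing_by
  simp only [List.length_cons]
  exact Nat.lt_succ_of_le (List.length_dropWhile_le _ _)


theorem foldl_fix {α β : Type} (f : β → α → β) (st : β) (l : List α)
    (h : ∀ x ∈ l, f st x = st) : l.foldl f st = st := by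
  induction l with
  | nil => rfl
  | cons a t ih =>
    simp only [List.foldl_cons, h a (by simp)]
    exact ih (fun x hx => h x (by simp [hx]))

theorem rle_mem (s : List Int) (x : Int) : x ∈ (rle s).map Prod.fst ↔ x ∈ s := by
  induction s using rle.induct with
  | case1 => simp [rle]
  | case2 v r ih =>
    rw [rle]
    simp only [List.map_cons, List.mem_cons, ih]
    constructor
    · rintro (rfl | hx)
      · simp
      · have : x ∈ r := (List.dropWhile_sublist _).mem hx
        simp [this]
    · rintro (rfl | hx)
      · simp
      · rcases (List.mem_append.1 (by rw [List.takeWhile_append_dropWhile]; exact hx :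
          x ∈ r.takeWhile (· == v) ++ r.dropWhile (· == v))) with h | h
        · left; have := List.mem_takeWhile_imp h; simpa using this.symm
        · right; exact h

-- every element of dropWhile (== v) of a ≥-sorted list is < v
theorem dropWhile_lt (v : Int) (r : List Int) (hr : r.Pairwise (· ≥ ·))
    (hle : ∀ x ∈ r, x ≤ v) : ∀ x ∈ r.dropWhile (· == v), x < v := by
  intro x hx
  rcases hd : r.dropWhile (· == v) with _ | ⟨w, t⟩
  · simp [hd] at hx
  · have hw : ¬ (w == v) = true := by
      have hne : r.dropWhile (· == v) ≠ [] := by rw [hd]; simp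
      have := List.head_dropWhile_not (· == v) hne
      have hw0 : (List.dropWhile (fun x => x == v) r).head hne = w := by
        simp [hd]
      rw [hw0] at this
      simp [this]
    have hwv : w ≠ v := by simpa using hw
    have hwr : w ∈ r := (List.dropWhile_sublist _).mem (by rw [hd]; simp)
    have hwle : w < v := lt_of_le_of_ne (hle w hwr) hwv
    have hpw : (w :: t).Pairwise (· ≥ ·) := by
      rw [← hd]; exact hr.sublist (List.dropWhile_sublist _)
    rw [hd] at hx
    rcases List.mem_cons.1 hx with rfl | hxt
    · exact hwle
    · exact lt_of_le_of_lt (List.rel_of_pairwise_cons hpw hxt) hwle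

theorem rle_pairwise (s : List Int) (hs : s.Pairwise (· ≥ ·)) :
    ((rle s).map Prod.fst).Pairwise (· > ·) := by
  induction s using rle.induct with
  | case1 => simp [rle]
  | case2 v r ih =>
    rw [rle]
    simp only [List.map_cons]
    rw [List.pairwise_cons] at hs ⊢
    refine ⟨?_, ih (hs.2.sublist (List.dropWhile_sublist _))⟩
    intro x hx
    have hxd : x ∈ r.dropWhile (· == v) := (rle_mem _ x).1 hx
    exact dropWhile_lt v r hs.2 hs.1 x hxd

theorem rle_count (s : List Int) (hs : s.Pairwise (· ≥ ·)) :
    ∀ g ∈ rle s, g.2 = (s.count g.1 : Int) := by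
  induction s using rle.induct with
  | case1 => simp [rle]
  | case2 v r ih =>
    rw [rle]
    rw [List.pairwise_cons] at hs
    intro g hg
    have hlt := dropWhile_lt v r hs.2 hs.1
    rcases List.mem_cons.1 hg with rfl | hgt
    · -- head group
      simp only
      have hcr : r.count v = (r.takeWhile (· == v)).length := by
        conv_lhs => rw [← List.takeWhile_append_dropWhile (p := (· == v)) (l := r)]
        rw [List.count_append]
        have h1 : (r.takeWhile (· == v)).count v = (r.takeWhile (· == v)).length := by
          apply List.count_eq_length.2
          intro b hb
          have hb2 := List.mem_takeWhile_imp hb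
          simp only [beq_iff_eq] at hb2
          omega
        have h2 : (r.dropWhile (· == v)).count v = 0 :=
          List.count_eq_zero.2 (fun h => absurd (hlt v h) (lt_irrefl v))
        omega
      rw [List.count_cons_self]
      push_cast
      omega
    · have hg2 := ih (hs.2.sublist (List.dropWhile_sublist _)) g hgt
      have hg1mem : g.1 ∈ r.dropWhile (· == v) := by
        have : g.1 ∈ (rle (r.dropWhile (· == v))).map Prod.fst := List.mem_map_of_mem hgt
        exact (rle_mem _ _).1 this
      have hg1lt : g.1 < v := hlt g.1 hg1mem
      rw [hg2]
      congr 1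
      rw [List.count_cons_of_ne (by omega)]
      conv_rhs => rw [← List.takeWhile_append_dropWhile (p := (· == v)) (l := r)]
      rw [List.count_append]
      have h1 : (r.takeWhile (· == v)).count g.1 = 0 :=
        List.count_eq_zero.2 (fun h => by
          have := List.mem_takeWhile_imp h
          simp only [beq_iff_eq] at this
          omega)
      omega

theorem loopA_drop (s : List Int) : ∀ (p : Nat) (d : List (List Int)), p ≤ s.length →
    ((PySem.List.pyRange ((p : Int) + 1) ((s.length : Int) + 1) 1).foldl
        (stepA s (s.length : Int)) ((p : Int), d)).2
      = d ++ (rle (s.drop p)).map (fun g => [g.1, g.2]) := by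
  have main : ∀ m (p : Nat) (d : List (List Int)), s.length - p = m → p ≤ s.length →
      ((PySem.List.pyRange ((p : Int) + 1) ((s.length : Int) + 1) 1).foldl
          (stepA s (s.length : Int)) ((p : Int), d)).2
        = d ++ (rle (s.drop p)).map (fun g => [g.1, g.2]) := by
    intro m
    induction m using Nat.strong_induction_on with
    | _ m ih =>
      intro p d hm hp
      cases hdrop : s.drop p with
      | nil =>
        have hb : ((s.length : Int) + 1) ≤ ((p : Int) + 1) := by
          have := List.drop_eq_nil_iff.1 hdrop
          omega
        rw [PySem.List.pyRange_one_eq_nil hb, List.foldl_nil]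
        simp [rle]
      | cons v r =>
        have hplen : p < s.length := by
          by_contra hc
          have h0 : s.drop p = [] := List.drop_eq_nil_iff.2 (by omega)
          rw [h0] at hdrop
          simp at hdrop
        have hrun_head : (s.drop p).takeWhile (· == v) = v :: r.takeWhile (· == v) := by
          rw [hdrop, List.takeWhile_cons]
          simp
        set k := ((s.drop p).takeWhile (· == v)).length with hkdef
        have hk1 : 1 ≤ k := by rw [hkdef, hrun_head]; simp
        have hklen : k ≤ s.length - p := by
          have h1 := (List.takeWhile_prefix (l := s.drop p) (· == v)).length_le
          rw [List.length_drop] at h1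
          omega
        have hsplit : s.drop p
            = (s.drop p).takeWhile (· == v) ++ (s.drop p).dropWhile (· == v) :=
          (List.takeWhile_append_dropWhile).symm
        have hdropk : s.drop (p + k) = (s.drop p).dropWhile (· == v) := by
          have h1 : s.drop (p + k) = (s.drop p).drop k := by
            rw [List.drop_drop]
          rw [h1]
          conv_lhs => rw [hsplit, hkdef]
          exact List.drop_left ..
        have hget : ∀ j : Nat, j < k →
            PySem.List.pyGet? s ((p : Int) + (j : Int)) = some v := by
          intro j hj
          have hlen : p + j < s.length := by omega
          have hc : ((p : Int) + (j : Int)) = ((p + j : Nat) : Int) := by push_cast; ring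
          rw [hc, PySem.List.pyGet?_natCast, List.getElem?_eq_getElem hlen]
          have hjrun : j < ((s.drop p).takeWhile (· == v)).length := hj
          have h1 : s[p + j] = (s.drop p)[j]'(by rw [List.length_drop]; omega) := by
            rw [List.getElem_drop]
          have h2 : ((s.drop p).takeWhile (· == v))[j]'hjrun
              = (s.drop p)[j]'(by rw [List.length_drop]; omega) :=
            (List.takeWhile_prefix _).getElem hjrun
          have h3 := List.mem_takeWhile_imp (List.getElem_mem hjrun)
          simp only [beq_iff_eq] at h3
          rw [h1, ← h2, h3]
        have hafter : p + k < s.length →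
            PySem.List.pyGet? s ((p : Int) + (k : Int)) ≠ some v := by
          intro hlt
          have hc : ((p : Int) + (k : Int)) = ((p + k : Nat) : Int) := by push_cast; ring
          rw [hc, PySem.List.pyGet?_natCast, List.getElem?_eq_getElem hlt]
          intro hcon
          have hval : s[p + k] = v := by simpa using hcon
          have hlen2 : 0 < ((s.drop p).dropWhile (· == v)).length := by
            have := congrArg List.length hsplit
            rw [List.length_append, List.length_drop] at this
            omega
          have hne : (s.drop p).dropWhile (· == v) ≠ [] := by
            intro hnil
            rw [hnil] at hlen2
            simp at hlen2
          have hk' : k < (s.drop p).length := by rw [List.length_drop]; omega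
          have h1 : s[p + k] = (s.drop p)[k]'hk' := by
            rw [List.getElem_drop]
          have h4 : (s.drop p)[k]'hk'
              = ((s.drop p).dropWhile (· == v))[0]'hlen2 := by
            have e1 : (s.drop p)[k]'hk'
                = ((s.drop p).takeWhile (· == v) ++ (s.drop p).dropWhile (· == v))[k]'(by
                    rw [← hsplit]; exact hk') :=
              List.getElem_of_eq hsplit hk'
            rw [e1, List.getElem_append_right (by omega)]
            congr 1
            omega
          have h6 : ((s.drop p).dropWhile (· == v))[0]'hlen2
              = ((s.drop p).dropWhile (· == v)).head hne := List.getElem_zero hlen2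
          have hh := List.head_dropWhile_not (· == v) hne
          rw [h6] at h4
          rw [h1, h4] at hval
          rw [hval] at hh
          simp at hh
        have hA : ((p : Int) + 1) ≤ ((p : Int) + (k : Int)) := by omega
        have hB : ((p : Int) + (k : Int)) ≤ ((s.length : Int) + 1) := by omega
        rw [PySem.List.pyRange_one_append ((p : Int) + 1) ((p : Int) + (k : Int))
          ((s.length : Int) + 1) hA hB, List.foldl_append]
        have hnoop : List.foldl (stepA s (s.length : Int)) ((p : Int), d)
            (PySem.List.pyRange ((p : Int) + 1) ((p : Int) + (k : Int)) 1)
            = ((p : Int), d) := by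
          apply foldl_fix
          intro i hi
          rw [PySem.List.mem_pyRange_one] at hi
          have hij : i = (p : Int) + (((i - (p : Int)).toNat : Nat) : Int) := by omega
          have hcond : ¬(i = (s.length : Int)
              ∨ PySem.List.pyGet? s i ≠ PySem.List.pyGet? s (i - 1)) := by
            refine not_or.2 ⟨by omega, ?_⟩
            rw [not_ne_iff]
            have e1 : PySem.List.pyGet? s i = some v := by
              rw [hij]; exact hget _ (by omega)
            have e2 : PySem.List.pyGet? s (i - 1) = some v := by
              have hm1 : i - 1 = (p : Int) + (((i - (p : Int)).toNat - 1 : Nat) : Int) := by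
                omega
              rw [hm1]; exact hget _ (by omega)
            rw [e1, e2]
          simp only [stepA, if_neg hcond]
        rw [hnoop]
        have hcons : PySem.List.pyRange ((p : Int) + (k : Int)) ((s.length : Int) + 1) 1
            = ((p : Int) + (k : Int))
              :: PySem.List.pyRange ((p : Int) + (k : Int) + 1) ((s.length : Int) + 1) 1 :=
          PySem.List.pyRange_one_cons (by omega)
        rw [hcons, List.foldl_cons]
        have e3 : PySem.List.pyGet? s ((p : Int) + (k : Int) - 1) = some v := by
          have hm1 : (p : Int) + (k : Int) - 1 = (p : Int) + ((k - 1 : Nat) : Int) := by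
            omega
          rw [hm1]; exact hget _ (by omega)
        have hcondT : ((p : Int) + (k : Int) = (s.length : Int)
            ∨ PySem.List.pyGet? s ((p : Int) + (k : Int))
              ≠ PySem.List.pyGet? s ((p : Int) + (k : Int) - 1)) := by
          by_cases hpk : p + k = s.length
          · left; omega
          · right
            rw [e3]
            exact hafter (by omega)
        have hstep : stepA s (s.length : Int) ((p : Int), d) ((p : Int) + (k : Int))
            = (((p + k : Nat) : Int), d ++ [[v, (k : Int)]]) := by
          have hc2 : (p : Int) + (k : Int) - (p : Int) = (k : Int) := by ring
          rw [e3] at hcondT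
          simp only [stepA, e3, hc2]
          split_ifs
          exact Prod.ext (by simp) (by simp)
        rw [hstep]
        have hih := ih (s.length - (p + k)) (by omega) (p + k) (d ++ [[v, (k : Int)]])
          rfl (by omega)
        have hca : ((p + k : Nat) : Int) + 1 = ((p : Int) + (k : Int) + 1) := by
          push_cast; ring
        rw [hca] at hih
        rw [hih]
        have hdw : (s.drop p).dropWhile (· == v) = r.dropWhile (· == v) := by
          rw [hdrop, List.dropWhile_cons]
          simp
        have hkk : (k : Int) = 1 + ((r.takeWhile (· == v)).length : Int) := by
          rw [hkdef, hrun_head]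
          push_cast [List.length_cons]
          ring
        rw [hdropk]
        have hrle : rle (v :: r) = (v, (k : Int)) :: rle ((s.drop p).dropWhile (· == v)) := by
          rw [rle, hdw, hkk]
        rw [hrle]
        simp [List.append_assoc]
  intro p d hp
  exact main (s.length - p) p d rfl hp

-- ===== VERDICT (by name: the statement is the Claim_ definition above) =====
theorem makeD_spec : Claim_equal_makeD := by
  intro l _
  unfold Spec_makeD makeD makeD_alt
  simp only []
  set first := (PySem.List.pyGet? l 0).getD 0 with hfirst
  set diffs := (PySem.List.slice l (some 1) none).map (fun i => first - i) with hdiffs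
  set s := PySem.List.sorted diffs (fun x => x) true with hsdef
  have hcounts : (PySem.List.slice l (some 1) none).foldl
      (fun d i => d.insert (first - i) (d.getD (first - i) 0 + 1)) PySem.Dict.empty
      = PySem.Dict.counter diffs := by
    rw [hdiffs, ← PySem.Dict.foldl_insert_getD_add_one_eq_counter, List.foldl_map]
  rw [hcounts, PySem.Dict.keys_counter]
  have hspair : s.Pairwise (· ≥ ·) := PySem.List.sorted_pairwise_rev diffs (fun x => x)
  have hA := loopA_drop s 0 [] (by simp)
  norm_num at hA
  rw [hA]
  have hnd1 : ((rle s).map Prod.fst).Nodup :=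
    (rle_pairwise s hspair).imp (fun h => ne_of_gt h)
  have hperm : ((rle s).map Prod.fst).Perm (PySem.Set.ofList diffs) := by
    rw [List.perm_ext_iff_of_nodup hnd1 (PySem.Set.nodup_ofList diffs)]
    intro x
    rw [rle_mem, PySem.Set.mem_ofList, PySem.List.mem_sorted]
  have hsort : PySem.List.sorted (PySem.Set.ofList diffs) (fun x => x) true
      = (rle s).map Prod.fst :=
    PySem.List.sorted_rev_eq_of_perm_of_pairwise_gt _ _ _ hperm (rle_pairwise s hspair)
  rw [hsort, List.map_map, List.map_map]
  apply List.map_congr_left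
  intro g hg
  have hg1s : g.1 ∈ s := by
    rw [← rle_mem]
    exact List.mem_map_of_mem hg
  have hcnt : g.2 = (s.count g.1 : Int) := rle_count s hspair g hg
  have hcntd : s.count g.1 = diffs.count g.1 :=
    (PySem.List.sorted_perm diffs (fun x => x) true).count_eq g.1
  have hpos : 0 < s.count g.1 := List.count_pos_iff.2 hg1s
  have e0 : PySem.List.pyGet? [g.1, g.2] 0 = some g.1 := by
    simp [PySem.List.pyGet?, PySem.List.pyIdx?]
  have e1 : PySem.List.pyGet? [g.1, g.2] 1 = some g.2 := by
    simp [PySem.List.pyGet?, PySem.List.pyIdx?]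
  have egd : (PySem.Dict.counter diffs).getD g.1 0 = (diffs.count g.1 : Int) :=
    PySem.Dict.getD_counter diffs g.1
  simp only [Function.comp, e0, e1, Option.getD_some, egd]
  rw [hcnt, hcntd]
  rw [log2i_eq_bitLength _ (by omega)]
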